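-- pv_equiv track=rewrite | github.com/chetan-stack/algo | SmartApi/storesupportzone.py | checkclosenear_price
-- ===== SOURCE A (Python) =====
-- def checkclosenear_price(level,close):
--     less_than = None
--     greater_than = None
--
--     for price in level:
--         price = int(price)  # Ensure price is an integer
--
--         if price < close:
--             if less_than is None or (close - price) < (close - less_than):
--                 less_than = price
--         elif price > close:
--             if greater_than is None or (price - close) < (greater_than - close):
--                 greater_than = price
--
--     # Ensure a valid return type
--     less_than = less_than if less_than is not None else 0  # Default to 0 if no lower value found
--     greater_than = greater_than if greater_than is not None else 0  # Default to 0 if no higher value found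
--
--     return less_than, greater_than
-- ===== SOURCE B (Python) =====
-- def checkclosenear_price(level, close):
--     ints = [int(p) for p in level]
--     lowers = [p for p in ints if p < close]
--     highers = [p for p in ints if p > close]
--     return (max(lowers) if lowers else 0, min(highers) if highers else 0)
-- ===== Notes on version B (the rewrite author's own statement) =====
-- stated objective: simpler
-- what changed: Replaces the single state-tracking loop (nearest by distance, with None sentinels) by two filtered aggregations: max of the values below close and min of the values above, defaulting to 0 on empty filters.
import Mathlib
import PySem

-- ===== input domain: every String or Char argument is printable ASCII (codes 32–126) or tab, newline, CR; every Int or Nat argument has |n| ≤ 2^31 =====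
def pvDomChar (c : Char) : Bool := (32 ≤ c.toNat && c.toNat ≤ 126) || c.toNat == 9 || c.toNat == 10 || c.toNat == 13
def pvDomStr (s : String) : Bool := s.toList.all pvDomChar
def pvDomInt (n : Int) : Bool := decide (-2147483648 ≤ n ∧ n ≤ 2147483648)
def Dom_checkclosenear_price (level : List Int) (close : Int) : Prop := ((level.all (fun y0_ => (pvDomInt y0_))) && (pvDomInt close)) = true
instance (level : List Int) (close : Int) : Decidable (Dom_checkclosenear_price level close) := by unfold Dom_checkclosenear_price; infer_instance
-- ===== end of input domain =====

-- B replaces A's single distance-tracking loop with two filtered aggregations (max below / min above, default 0); objective: simpler.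

-- ===== PORT A =====
-- one loop step of A: update (less_than, greater_than) with price
def cnpStep (close : Int) (st : Option Int × Option Int) (price : Int) : Option Int × Option Int :=
  if price < close then
    match st.1 with
    | none => (some price, st.2)
    | some lt => if close - price < close - lt then (some price, st.2) else st
  else if close < price then
    match st.2 with
    | none => (st.1, some price)
    | some gt => if price - close < gt - close then (st.1, some price) else st
  else st

def checkclosenear_price (level : List Int) (close : Int) : Int × Int :=
  let st := level.foldl (cnpStep close) (none, none)
  (st.1.getD 0, st.2.getD 0)

-- ===== PORT B =====
def checkclosenear_price_alt (level : List Int) (close : Int) : Int × Int :=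
  let ints := level.map (fun p => p)  -- int(p) is the identity on Int
  let lowers := ints.filter (fun p => p < close)
  let highers := ints.filter (fun p => close < p)
  ((PySem.List.max? lowers (fun x => x)).getD 0, (PySem.List.min? highers (fun x => x)).getD 0)

-- ===== PRECONDITION & SPEC =====
def Spec_checkclosenear_price (level : List Int) (close : Int) (out : Int × Int) : Prop := out = checkclosenear_price_alt level close
instance (level : List Int) (close : Int) (out : Int × Int) : Decidable (Spec_checkclosenear_price level close out) := by unfold Spec_checkclosenear_price; infer_instance

-- ===== CLAIM (what is proved, stated in full; the proofs are below) =====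
def Claim_equal_checkclosenear_price : Prop := ∀ (level : List Int) (close : Int), Dom_checkclosenear_price level close → Spec_checkclosenear_price level close (checkclosenear_price level close)

-- ===== LEMMAS AND PROOFS =====
def cnpMaxo (o : Option Int) (p : Int) : Option Int :=
  some (match o with | none => p | some x => max x p)

def cnpMino (o : Option Int) (p : Int) : Option Int :=
  some (match o with | none => p | some x => min x p)

-- A's loop computes the running max of the lowers and running min of the highers
theorem cnp_foldl_eq (close : Int) : ∀ (l : List Int) (lt gt : Option Int),
    l.foldl (cnpStep close) (lt, gt)
      = ((l.filter (fun p => decide (p < close))).foldl cnpMaxo lt,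
         (l.filter (fun p => decide (close < p))).foldl cnpMino gt) := by
  intro l
  induction l with
  | nil => intro lt gt; simp
  | cons x t ih =>
    intro lt gt
    by_cases h1 : x < close
    · have h2 : ¬ close < x := by omega
      have hstep : cnpStep close (lt, gt) x = (cnpMaxo lt x, gt) := by
        cases lt with
        | none => simp [cnpStep, cnpMaxo, h1]
        | some a =>
          simp only [cnpStep, cnpMaxo, h1, if_pos]
          by_cases h3 : close - x < close - a
          · simp [h3, show max a x = x by omega]
          · simp [h3, show max a x = a by omega]
      simp [h1, h2, List.foldl_cons, hstep, ih]
    · by_cases h2 : close < x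
      · have hstep : cnpStep close (lt, gt) x = (lt, cnpMino gt x) := by
          cases gt with
          | none => simp [cnpStep, cnpMino, h1, h2]
          | some a =>
            simp only [cnpStep, cnpMino, h1, h2, if_pos, ite_false]
            by_cases h3 : x - close < a - close
            · simp [h3, show min a x = x by omega]
            · simp [h3, show min a x = a by omega]
        simp [h1, h2, List.foldl_cons, hstep, ih]
      · have hstep : cnpStep close (lt, gt) x = (lt, gt) := by
          simp [cnpStep, h1, h2]
        simp [h1, h2, List.foldl_cons, hstep, ih]

theorem cnpMaxo_some : ∀ (t : List Int) (x : Int), t.foldl cnpMaxo (some x) = some (t.foldl max x) := by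
  intro t
  induction t with
  | nil => intro x; rfl
  | cons y s ih => intro x; simp [List.foldl_cons, cnpMaxo, ih]

theorem cnpMino_some : ∀ (t : List Int) (x : Int), t.foldl cnpMino (some x) = some (t.foldl min x) := by
  intro t
  induction t with
  | nil => intro x; rfl
  | cons y s ih => intro x; simp [List.foldl_cons, cnpMino, ih]

theorem cnpMaxo_eq_max? (l : List Int) :
    l.foldl cnpMaxo none = PySem.List.max? l (fun x => x) := by
  cases l with
  | nil => rfl
  | cons x t =>
    rw [PySem.List.max?_id_cons]
    simp [List.foldl_cons, cnpMaxo, cnpMaxo_some]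

theorem cnpMino_eq_min? (l : List Int) :
    l.foldl cnpMino none = PySem.List.min? l (fun x => x) := by
  cases l with
  | nil => rfl
  | cons x t =>
    rw [PySem.List.min?_id_cons]
    simp [List.foldl_cons, cnpMino, cnpMino_some]

-- ===== VERDICT (by name: the statement is the Claim_ definition above) =====
theorem checkclosenear_price_spec : Claim_equal_checkclosenear_price := by
  intro level close _
  unfold Spec_checkclosenear_price checkclosenear_price checkclosenear_price_alt
  simp only [List.map_id_fun', id, cnp_foldl_eq, cnpMaxo_eq_max?, cnpMino_eq_min?]
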